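-- pv_equiv track=rewrite | github.com/sherlyn99/redgenes | scripts/process_bakta_output.py | process_dbxref
-- ===== SOURCE A (Python) =====
-- def process_dbxref(dbxref_entry):
--     entry_dict = {}
--     if dbxref_entry:
--         entries = dbxref_entry.split(',')
--         for entry in entries:
--             entry_type, entry_value = entry.split(':')
--             if entry_type not in entry_dict:
--                 entry_dict[entry_type] = [entry_value]
--             else:
--                 entry_dict[entry_type].append(entry_value)
--     else:
--         entry_dict = {}
--     dbxref_edit = {}
--     for key, value in entry_dict.items():
--         if isinstance(value, list):
--             value_str = ', '.join(value)
--             dbxref_edit[key] = value_str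
--         else:
--             dbxref_edit[key] = value
--     return dbxref_edit
-- ===== SOURCE B (Python) =====
-- def process_dbxref(dbxref_entry):
--     # Staged strategy: one pass collects (type, value) pairs, then a dict
--     # comprehension over first-occurrence types joins each type's values.
--     if not dbxref_entry:
--         return {}
--     pairs = []
--     for entry in dbxref_entry.split(','):
--         entry_type, entry_value = entry.split(':')
--         pairs.append((entry_type, entry_value))
--     return {t: ', '.join(v for t2, v in pairs if t2 == t)
--             for t in dict.fromkeys(t for t, _ in pairs)}
-- ===== Notes on version B (the rewrite author's own statement) =====
-- stated objective: alternative
-- what changed: B first collects all (type, value) pairs in one flat pass, then builds the result with a comprehension over the first-occurrence-ordered distinct types, joining each type's filtered values; A instead incrementally grows per-type value lists in a dict and runs a second loop to join them. Pre_ excludes inputs where some comma-separated entry does not split on a colon into exactly two parts, on which both A and B raise ValueError.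
import Mathlib
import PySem

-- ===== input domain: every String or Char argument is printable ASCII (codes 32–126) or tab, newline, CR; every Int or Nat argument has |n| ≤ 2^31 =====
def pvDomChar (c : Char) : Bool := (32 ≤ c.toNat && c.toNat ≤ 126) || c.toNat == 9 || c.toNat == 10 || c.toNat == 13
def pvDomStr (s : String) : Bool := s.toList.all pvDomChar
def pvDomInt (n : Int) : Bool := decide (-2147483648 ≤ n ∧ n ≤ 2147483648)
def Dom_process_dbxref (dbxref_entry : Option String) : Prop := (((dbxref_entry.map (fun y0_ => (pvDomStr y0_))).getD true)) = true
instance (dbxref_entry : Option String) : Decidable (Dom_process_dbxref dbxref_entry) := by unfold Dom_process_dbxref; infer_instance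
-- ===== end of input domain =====

-- B replaces A's incremental dict-of-value-lists plus second joining loop by a staged
-- strategy: collect all (type, value) pairs flat, then map each first-occurrence type
-- to the join of its filtered values. Equivalence of the RETURN values is proved on
-- Pre_ (inputs where A does not raise).

-- ===== PORT A =====
-- A's loop body: entry_type, entry_value = entry.split(':'); grow the value list
def pvStepA (d : PySem.Dict String (List String)) (entry : String) : PySem.Dict String (List String) :=
  match PySem.Str.split? entry ":" with
  | some [t, v] =>
    if d.contains t = false then d.insert t [v]
    else d.modify t [] (fun l => l ++ [v])
  | _ => d   -- 'a, b = entry.split(":")' raises ValueError here: excluded by Pre_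

def process_dbxref (dbxref_entry : Option String) : List (String × String) :=
  let entry_dict : PySem.Dict String (List String) :=
    match dbxref_entry with
    | some s =>
      if s ≠ "" then ((PySem.Str.split? s ",").getD []).foldl pvStepA PySem.Dict.empty
      else PySem.Dict.empty
    | none => PySem.Dict.empty
  -- second loop; every stored value is a list, so the isinstance branch joins it
  (entry_dict.items.foldl (fun d kv => d.insert kv.1 (PySem.Str.join ", " kv.2))
      (PySem.Dict.empty : PySem.Dict String String)).items

-- ===== PORT B =====
-- pairs.append((entry_type, entry_value)) for each entry
def pvStepB (acc : List (String × String)) (entry : String) : List (String × String) :=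
  match PySem.Str.split? entry ":" with
  | some [t, v] => acc ++ [(t, v)]
  | _ => acc   -- 'a, b = entry.split(":")' raises ValueError here: excluded by Pre_

def process_dbxref_alt (dbxref_entry : Option String) : List (String × String) :=
  match dbxref_entry with
  | none => []
  | some s =>
    if s = "" then []
    else
      let pairs := ((PySem.Str.split? s ",").getD []).foldl pvStepB []
      -- {t: ', '.join(v for t2, v in pairs if t2 == t) for t in dict.fromkeys(...)}
      (PySem.List.dedup (pairs.map Prod.fst)).map
        (fun t => (t, PySem.Str.join ", " ((pairs.filter (fun p => p.1 == t)).map Prod.snd)))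

-- ===== PRECONDITION & SPEC =====
-- Pre_ excludes exactly the inputs on which A raises ValueError: a truthy string in
-- which some comma-separated entry does not split on a colon into exactly two parts.
def Pre_process_dbxref (dbxref_entry : Option String) : Prop :=
  dbxref_entry.getD "" = "" ∨
    ∀ entry ∈ (PySem.Str.split? (dbxref_entry.getD "") ",").getD [],
      ((PySem.Str.split? entry ":").getD []).length = 2

instance (dbxref_entry : Option String) : Decidable (Pre_process_dbxref dbxref_entry) := by
  unfold Pre_process_dbxref; infer_instance

def pvWitness_process_dbxref : Option String := some "GO:0001, GO:0002,EC:7.1.1"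

def Spec_process_dbxref (dbxref_entry : Option String) (out : List (String × String)) : Prop := out = process_dbxref_alt dbxref_entry
instance (dbxref_entry : Option String) (out : List (String × String)) : Decidable (Spec_process_dbxref dbxref_entry out) := by unfold Spec_process_dbxref; infer_instance

-- ===== CLAIM (what is proved, stated in full; the proofs are below) =====
def Claim_equal_process_dbxref : Prop := ∀ (dbxref_entry : Option String), Dom_process_dbxref dbxref_entry → Pre_process_dbxref dbxref_entry → Spec_process_dbxref dbxref_entry (process_dbxref dbxref_entry)

-- ===== LEMMAS AND PROOFS =====

-- the pair each entry contributes (none = skipped/raising entry)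
def pvPairFn (e : String) : Option (String × String) :=
  match PySem.Str.split? e ":" with
  | some [t, v] => some (t, v)
  | _ => none

-- B's pair-collecting loop is filterMap of pvPairFn
theorem stepB_eq_filterMap : ∀ (entries : List String) (acc : List (String × String)),
    entries.foldl pvStepB acc = acc ++ entries.filterMap pvPairFn := by
  intro entries
  induction entries with
  | nil => intro acc; simp
  | cons e rest ih =>
    intro acc
    simp only [List.foldl_cons, List.filterMap_cons]
    cases h : PySem.Str.split? e ":" with
    | none => simp [pvStepB, pvPairFn, h, ih]
    | some parts =>
      match parts with
      | [] => simp [pvStepB, pvPairFn, h, ih]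
      | [t] => simp [pvStepB, pvPairFn, h, ih]
      | [t, v] => simp [pvStepB, pvPairFn, h, ih]
      | t :: v :: w :: r => simp [pvStepB, pvPairFn, h, ih]

-- invariant of A's first loop: keys are first-occurrence types, value lists are the
-- filtered values, keys stay Nodup
theorem stepA_invariant : ∀ (entries : List String) (d : PySem.Dict String (List String)),
    d.keys.Nodup →
    (entries.foldl pvStepA d).keys
        = PySem.Set.update d.keys ((entries.filterMap pvPairFn).map Prod.fst) ∧
    (entries.foldl pvStepA d).keys.Nodup ∧
    ∀ c, (entries.foldl pvStepA d).getD c []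
        = d.getD c [] ++ ((entries.filterMap pvPairFn).filter (fun p => p.1 == c)).map Prod.snd := by
  intro entries
  induction entries with
  | nil => intro d hnd; refine ⟨rfl, hnd, fun c => by simp⟩
  | cons e rest ih =>
    intro d hnd
    simp only [List.foldl_cons, List.filterMap_cons]
    cases h : PySem.Str.split? e ":" with
    | none =>
      have ha : pvStepA d e = d := by simp [pvStepA, h]
      rw [ha]; simpa [pvPairFn, h] using ih d hnd
    | some parts =>
      match parts with
      | [] =>
        have ha : pvStepA d e = d := by simp [pvStepA, h]
        rw [ha]; simpa [pvPairFn, h] using ih d hnd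
      | [t] =>
        have ha : pvStepA d e = d := by simp [pvStepA, h]
        rw [ha]; simpa [pvPairFn, h] using ih d hnd
      | t :: v :: w :: r =>
        have ha : pvStepA d e = d := by simp [pvStepA, h]
        rw [ha]; simpa [pvPairFn, h] using ih d hnd
      | [t, v] =>
        have hpf : pvPairFn e = some (t, v) := by simp [pvPairFn, h]
        by_cases hc : d.contains t = true
        · -- existing key: modify appends v
          have ha : pvStepA d e = d.modify t [] (fun l => l ++ [v]) := by
            simp [pvStepA, h, hc]
          have hmem : t ∈ d.keys := (PySem.Dict.contains_iff_mem_keys d t).mp hc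
          have hk : (d.modify t [] (fun l => l ++ [v])).keys = d.keys := by
            rw [PySem.Dict.keys_modify, PySem.Dict.keys_insert_of_contains d _ hc]
          obtain ⟨hkeys, hnd', hval⟩ := ih (d.modify t [] (fun l => l ++ [v])) (hk ▸ hnd)
          rw [ha]
          refine ⟨?_, hnd', ?_⟩
          · rw [hkeys, hk, hpf]
            simp only [List.map]
            show PySem.Set.update _ _ = PySem.Set.update d.keys (t :: _)
            simp [PySem.Set.update, List.foldl_cons, PySem.Set.add_of_mem hmem]
          · intro c
            rw [hval c, PySem.Dict.getD_modify, hpf]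
            by_cases hct : c = t
            · subst hct; simp [List.append_assoc]
            · have : (t == c) = false := by
                simp only [beq_eq_false_iff_ne]; exact Ne.symm hct
              simp [hct, this]
        · -- fresh key: insert [v]
          have hcf : d.contains t = false := by
            cases hx : d.contains t with
            | true => exact absurd hx hc
            | false => rfl
          have ha : pvStepA d e = d.insert t [v] := by simp [pvStepA, h, hcf]
          have hnotmem : t ∉ d.keys := fun hm =>
            hc ((PySem.Dict.contains_iff_mem_keys d t).mpr hm)
          have hk : (d.insert t [v]).keys = d.keys ++ [t] :=
            PySem.Dict.keys_insert_of_not_contains d [v] hcf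
          have hnd2 : (d.insert t [v]).keys.Nodup := by
            rw [hk]
            simpa [List.nodup_append] using ⟨hnd, fun a ha h => hnotmem (h ▸ ha)⟩
          obtain ⟨hkeys, hnd', hval⟩ := ih (d.insert t [v]) hnd2
          rw [ha]
          refine ⟨?_, hnd', ?_⟩
          · rw [hkeys, hk, hpf]
            simp only [List.map]
            show PySem.Set.update _ _ = PySem.Set.update d.keys (t :: _)
            simp [PySem.Set.update, List.foldl_cons, PySem.Set.add_of_not_mem hnotmem]
          · intro c
            rw [hval c, PySem.Dict.getD_insert, hpf]
            by_cases hct : c = t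
            · subst hct
              simp [PySem.Dict.getD_of_not_contains d ([] : List String) hcf]
            · have : (t == c) = false := by
                simp only [beq_eq_false_iff_ne]; exact Ne.symm hct
              simp [hct, this]

-- A's second loop over a Nodup-keyed dict just maps join over the items
theorem second_loop_items (dA : PySem.Dict String (List String)) (hnd : dA.keys.Nodup) :
    (dA.items.foldl (fun d kv => d.insert kv.1 (PySem.Str.join ", " kv.2))
        (PySem.Dict.empty : PySem.Dict String String)).items
      = dA.items.map (fun kv => (kv.1, PySem.Str.join ", " kv.2)) := by
  have h := PySem.Dict.items_foldl_insert_fresh (l := dA.items) (k := Prod.fst)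
      (v := fun kv => PySem.Str.join ", " kv.2) (d := (PySem.Dict.empty : PySem.Dict String String))
      (fun a _ => by simp [PySem.Dict.contains_empty]) (by simpa [PySem.Dict.keys] using hnd)
  rw [h]
  simp [PySem.Dict.empty]

theorem process_dbxref_spec : Claim_equal_process_dbxref := by
  intro o _ _
  unfold Spec_process_dbxref
  cases o with
  | none => rfl
  | some s =>
    by_cases hs : s = ""
    · subst hs; rfl
    · show ((if s ≠ "" then ((PySem.Str.split? s ",").getD []).foldl pvStepA PySem.Dict.empty
              else PySem.Dict.empty).items.foldl
            (fun d kv => d.insert kv.1 (PySem.Str.join ", " kv.2))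
            (PySem.Dict.empty : PySem.Dict String String)).items
          = process_dbxref_alt (some s)
      rw [if_pos hs]
      simp only [process_dbxref_alt, if_neg hs]
      set entries := (PySem.Str.split? s ",").getD [] with hent
      set pairs := entries.filterMap pvPairFn with hpairs
      obtain ⟨hkeys, hnd, hval⟩ := stepA_invariant entries PySem.Dict.empty
        PySem.Dict.nodup_keys_empty
      set dA := entries.foldl pvStepA PySem.Dict.empty
      rw [second_loop_items dA hnd,
        PySem.Dict.items_eq_map_keys dA hnd [], List.map_map]
      rw [stepB_eq_filterMap entries []]
      simp only [List.nil_append]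
      have hkeys' : dA.keys = PySem.List.dedup (pairs.map Prod.fst) := by
        rw [hkeys]
        simp only [PySem.List.dedup_eq_ofList, PySem.Set.ofList_eq_foldl, PySem.Set.update,
          PySem.Dict.keys_empty]
        rw [hpairs]
      rw [hkeys']
      apply List.map_congr_left
      intro t _
      simp only [Function.comp_apply]
      rw [hval t]
      simp [PySem.Dict.getD_empty]
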